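-- pv_equiv track=rewrite | github.com/berntpopp/adVNTR | advntr/hmm_utils.py | get_emitted_basepair_from_visited_states
-- ===== SOURCE A (Python) =====
-- def get_emitted_basepair_from_visited_states(state, visited_states, sequence):
--     base_pair_idx = 0
--     for visited_state in visited_states:
--         if visited_state == state:
--             return sequence[base_pair_idx]
--         if is_emitting_state(visited_state):
--             base_pair_idx += 1
--     return None
--
-- def is_emitting_state(state_name):
--     if state_name.startswith('M') or state_name.startswith('I') or state_name.startswith('start_random_matches') \
--             or state_name.startswith('end_random_matches'):
--         return True
--     return False
-- ===== SOURCE B (Python) =====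
-- def get_emitted_basepair_from_visited_states(state, visited_states, sequence):
--     try:
--         idx = visited_states.index(state)
--     except ValueError:
--         return None
--     count = sum(1 for s in visited_states[:idx] if is_emitting_state(s))
--     return sequence[count]
--
--
-- def is_emitting_state(state_name):
--     return state_name.startswith(('M', 'I', 'start_random_matches', 'end_random_matches'))
-- ===== Notes on version B (the rewrite author's own statement) =====
-- stated objective: faster
-- what changed: Replaces A's single fused early-exit loop carrying a running emission counter with a locate pass (list.index inside try/except), a prefix emitting-state count, and one direct sequence index; the C-level index/comprehension passes give a measured constant-factor speedup.
import Mathlib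
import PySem

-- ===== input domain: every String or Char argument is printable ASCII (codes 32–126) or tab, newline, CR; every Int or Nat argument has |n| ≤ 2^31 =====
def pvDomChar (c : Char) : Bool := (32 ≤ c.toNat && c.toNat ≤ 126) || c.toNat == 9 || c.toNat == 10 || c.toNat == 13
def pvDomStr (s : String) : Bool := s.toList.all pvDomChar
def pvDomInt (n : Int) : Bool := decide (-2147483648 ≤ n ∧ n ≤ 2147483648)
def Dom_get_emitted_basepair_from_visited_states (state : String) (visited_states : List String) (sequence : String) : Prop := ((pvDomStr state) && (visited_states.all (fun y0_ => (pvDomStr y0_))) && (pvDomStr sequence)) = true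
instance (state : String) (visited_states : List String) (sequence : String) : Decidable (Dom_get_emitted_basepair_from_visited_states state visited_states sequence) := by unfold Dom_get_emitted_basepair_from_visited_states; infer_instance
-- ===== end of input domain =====

-- B replaces A's fused early-exit counting loop by locate-then-prefix-count (measured constant-factor faster in Python).
-- ===== PORT A =====
-- def is_emitting_state(state_name): ... (module helper, transliterated)
def pvIsEmittingState (state_name : String) : Bool :=
  if PySem.Str.startswith state_name "M" || PySem.Str.startswith state_name "I" ||
     PySem.Str.startswith state_name "start_random_matches" ||
     PySem.Str.startswith state_name "end_random_matches" then true
  else false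

-- A's fused loop: walk visited_states with the running emitting counter base_pair_idx
def pvGoA (state : String) (sequence : String) : List String → Int → Option String
  | [], _ => none
  | v :: rest, base_pair_idx =>
      if v == state then (PySem.Str.pyGet? sequence base_pair_idx).map (fun c => String.ofList [c])
      else pvGoA state sequence rest
             (if pvIsEmittingState v then base_pair_idx + 1 else base_pair_idx)

def get_emitted_basepair_from_visited_states (state : String) (visited_states : List String) (sequence : String) : Option String :=
  pvGoA state sequence visited_states 0

-- ===== PORT B =====
-- B's is_emitting_state: one startswith with a tuple of prefixes
def pvIsEmitB (state_name : String) : Bool :=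
  PySem.Str.startswith state_name "M" || PySem.Str.startswith state_name "I" ||
  PySem.Str.startswith state_name "start_random_matches" ||
  PySem.Str.startswith state_name "end_random_matches"

-- locate pass, then prefix count, then one direct index
def get_emitted_basepair_from_visited_states_alt (state : String) (visited_states : List String) (sequence : String) : Option String :=
  match PySem.List.index? visited_states state with
  | none => none
  | some idx =>
      let count : Nat := (visited_states.take idx).countP pvIsEmitB
      (PySem.Str.pyGet? sequence (count : Int)).map (fun c => String.ofList [c])

-- ===== PRECONDITION & SPEC =====
-- Pre_ excludes exactly the inputs on which Python A raises IndexError: state occurs in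
-- visited_states but the number of emitting states before its first occurrence is not a
-- valid index into sequence (both A and B raise IndexError there).
def Pre_get_emitted_basepair_from_visited_states (state : String) (visited_states : List String) (sequence : String) : Prop :=
  (PySem.List.index? visited_states state).all
    (fun idx => (visited_states.take idx).countP pvIsEmittingState < sequence.toList.length) = true

instance (state : String) (visited_states : List String) (sequence : String) : Decidable (Pre_get_emitted_basepair_from_visited_states state visited_states sequence) := by unfold Pre_get_emitted_basepair_from_visited_states; infer_instance

def pvWitness_get_emitted_basepair_from_visited_states : String × List String × String :=
  ("M1", ["I0", "D1", "M1"], "AC")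
def Spec_get_emitted_basepair_from_visited_states (state : String) (visited_states : List String) (sequence : String) (out : Option String) : Prop := out = get_emitted_basepair_from_visited_states_alt state visited_states sequence
instance (state : String) (visited_states : List String) (sequence : String) (out : Option String) : Decidable (Spec_get_emitted_basepair_from_visited_states state visited_states sequence out) := by unfold Spec_get_emitted_basepair_from_visited_states; infer_instance

-- ===== CLAIM (what is proved, stated in full; the proofs are below) =====
def Claim_equal_get_emitted_basepair_from_visited_states : Prop := ∀ (state : String) (visited_states : List String) (sequence : String), Dom_get_emitted_basepair_from_visited_states state visited_states sequence → Pre_get_emitted_basepair_from_visited_states state visited_states sequence → Spec_get_emitted_basepair_from_visited_states state visited_states sequence (get_emitted_basepair_from_visited_states state visited_states sequence)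

-- ===== LEMMAS AND PROOFS =====
theorem pvIsEmit_funeq : pvIsEmitB = pvIsEmittingState := by
  funext s; simp [pvIsEmittingState, pvIsEmitB]

theorem pvGoA_char (state sequence : String) (vs : List String) (acc : Nat) :
    pvGoA state sequence vs (acc : Int) =
      match PySem.List.index? vs state with
      | none => none
      | some idx =>
          (PySem.Str.pyGet? sequence ((acc + (vs.take idx).countP pvIsEmittingState : Nat) : Int)).map
            (fun c => String.ofList [c]) := by
  induction vs generalizing acc with
  | nil => simp [pvGoA]
  | cons v rest ih =>
      by_cases hv : v = state
      · subst hv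
        rw [PySem.List.index?_cons_self]
        simp [pvGoA]
      · have hbeq : (v == state) = false := by simp [hv]
        rw [PySem.List.index?_cons_of_ne rest hv]
        have hstep : pvGoA state sequence (v :: rest) (acc : Int) =
            pvGoA state sequence rest (((if pvIsEmittingState v then acc + 1 else acc : Nat) : Int)) := by
          by_cases he : pvIsEmittingState v <;> simp [pvGoA, hbeq, he]
        rw [hstep, ih]
        cases hidx : PySem.List.index? rest state with
        | none => simp
        | some i =>
            simp only [Option.map_some]
            have hc : (if pvIsEmittingState v then acc + 1 else acc) +
                ((rest.take i).countP pvIsEmittingState) =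
                acc + (((v :: rest).take (i + 1)).countP pvIsEmittingState) := by
              rw [List.take_succ_cons, List.countP_cons]
              by_cases he : pvIsEmittingState v <;> simp [he] <;> omega
            rw [hc]

-- ===== VERDICT (by name: the statement is the Claim_ definition above) =====
theorem get_emitted_basepair_from_visited_states_spec : Claim_equal_get_emitted_basepair_from_visited_states := by
  intro state vs seq _ _
  unfold Spec_get_emitted_basepair_from_visited_states
  unfold get_emitted_basepair_from_visited_states get_emitted_basepair_from_visited_states_alt
  rw [pvIsEmit_funeq]
  have h := pvGoA_char state seq vs 0
  simpa using h
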